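-- pv_equiv track=rewrite | github.com/cwru-sdle/FAIRLinked | FAIRLinked/RDFTableConversion/MDS_DF/utility.py | get_curie
-- ===== SOURCE A (Python) =====
-- def get_curie(iri, bindings):
--         """
--         Converts a full IRI to a CURIE using the provided bindings.
--         Defaults to 'obo:BFO_0000001' if no match is found
--         """
--         if not iri:
--             return "obo:BFO_0000001"
--
--         best_prefix = None
--         best_uri = ""
--
--         for prefix, uri in bindings.items():
--             # Skip JSON-LD keywords
--             if "@" in prefix:
--                 continue
--
--             # Check if the IRI starts with this namespace URI
--             if iri.startswith(str(uri)):
--                 # We want the longest matching URI for accuracy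
--                 if len(str(uri)) > len(best_uri):
--                     best_prefix = prefix
--                     best_uri = str(uri)
--
--         if best_prefix:
--             # Remove the URI part and join with the prefix
--             fragment = iri[len(best_uri):].lstrip('#/')
--             return f"{best_prefix}:{fragment}"
--
--         return "obo:BFO_0000001"
-- ===== SOURCE B (Python) =====
-- def get_curie(iri, bindings):
--     """
--     Converts a full IRI to a CURIE using the provided bindings.
--     Defaults to 'obo:BFO_0000001' if no match is found
--     """
--     if not iri:
--         return "obo:BFO_0000001"
--     candidates = [(prefix, str(uri)) for prefix, uri in bindings.items()
--                   if "@" not in prefix and iri.startswith(str(uri))]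
--     candidates.sort(key=lambda pu: len(pu[1]), reverse=True)
--     if not candidates:
--         return "obo:BFO_0000001"
--     prefix, uri = candidates[0]
--     return f"{prefix}:{iri[len(uri):].lstrip('#/')}"
-- ===== Notes on version B (the rewrite author's own statement) =====
-- stated objective: alternative
-- what changed: A keeps a running best-match state in one loop with a strict-longer test; B builds the candidate list with a filter comprehension, stably sorts it by namespace length descending, and takes the first element. Pre_ excludes bindings with a degenerate entry (an empty prefix, or an empty namespace URI matching the IRI): on such meaningless bindings A's falsy guards fall back to the default CURIE while B emits the literal CURIE, and neither value is specified.
-- outside the precondition, e.g. on get_curie('http://ex/a', {'': 'http://ex/'}): A returns 'obo:BFO_0000001', B returns ':a'; on get_curie('abc', {'p': ''}): A returns 'obo:BFO_0000001', B returns 'p:abc'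
import Mathlib
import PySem

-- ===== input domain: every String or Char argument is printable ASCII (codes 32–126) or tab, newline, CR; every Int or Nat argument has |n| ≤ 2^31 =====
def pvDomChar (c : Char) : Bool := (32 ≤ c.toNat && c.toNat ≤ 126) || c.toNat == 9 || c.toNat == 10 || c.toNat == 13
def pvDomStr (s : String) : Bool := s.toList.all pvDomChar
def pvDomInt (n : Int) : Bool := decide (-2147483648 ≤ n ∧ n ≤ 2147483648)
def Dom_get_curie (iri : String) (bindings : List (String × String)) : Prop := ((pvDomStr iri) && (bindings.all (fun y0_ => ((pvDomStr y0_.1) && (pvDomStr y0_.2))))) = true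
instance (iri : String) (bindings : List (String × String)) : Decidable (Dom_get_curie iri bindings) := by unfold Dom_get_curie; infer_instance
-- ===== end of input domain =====

-- B replaces A's running longest-match loop by filter + stable descending sort + take-first (objective: alternative decomposition, same cost class).

-- Hand port of Python's s.lstrip('#/') (drop leading '#' and '/' characters); exact, used by both ports.
def pyLstripHashSlash (s : String) : String :=
  String.ofList (s.toList.dropWhile (fun c => c == '#' || c == '/'))

-- ===== PORT A =====
-- A's loop body: skip prefixes containing '@', keep the strictly longest matching namespace
def pvStepA (iri : String) (b : Option String × String) (pu : String × String) : Option String × String :=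
  if PySem.Str.isIn "@" pu.1 then b
  else if PySem.Str.startswith iri pu.2 then
    (if PySem.Str.len pu.2 > PySem.Str.len b.2 then (some pu.1, pu.2) else b)
  else b

def get_curie (iri : String) (bindings : List (String × String)) : String :=
  if iri = "" then "obo:BFO_0000001"
  else
    match ((PySem.Dict.ofList bindings).items).foldl (pvStepA iri) (none, "") with
    | (some p, u) =>
        if p ≠ "" then
          p ++ ":" ++ pyLstripHashSlash (PySem.Str.slice iri (some (PySem.Str.len u)) none)
        else "obo:BFO_0000001"
    | (none, _) => "obo:BFO_0000001"

-- ===== PORT B =====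
-- B's comprehension condition: '@' not in prefix and iri.startswith(uri)
def pvCand (iri : String) (pu : String × String) : Bool :=
  !(PySem.Str.isIn "@" pu.1) && PySem.Str.startswith iri pu.2

def get_curie_alt (iri : String) (bindings : List (String × String)) : String :=
  if iri = "" then "obo:BFO_0000001"
  else
    match PySem.List.sorted (((PySem.Dict.ofList bindings).items).filter (pvCand iri))
            (fun pu => PySem.Str.len pu.2) true with
    | [] => "obo:BFO_0000001"
    | (p, u) :: _ =>
        p ++ ":" ++ pyLstripHashSlash (PySem.Str.slice iri (some (PySem.Str.len u)) none)

-- ===== PRECONDITION & SPEC =====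
-- Pre_ excludes bindings with a degenerate entry — an empty prefix, or an empty namespace URI
-- that (trivially) matches the IRI — on which A's falsy guards fall back to the default CURIE
-- while B emits the literal CURIE; neither value is specified for such meaningless bindings.
def Pre_get_curie (iri : String) (bindings : List (String × String)) : Prop :=
  ∀ pu ∈ bindings,
    (PySem.Str.isIn "@" pu.1 = false ∧ PySem.Str.startswith iri pu.2 = true) →
      (pu.1 ≠ "" ∧ pu.2 ≠ "")
instance (iri : String) (bindings : List (String × String)) : Decidable (Pre_get_curie iri bindings) := by unfold Pre_get_curie; infer_instance

def pvWitness_get_curie : String × (List (String × String)) :=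
  ("http://ex/A", [("@ctx", "http://ex/"), ("ex", "http://ex/")])

def Spec_get_curie (iri : String) (bindings : List (String × String)) (out : String) : Prop := out = get_curie_alt iri bindings
instance (iri : String) (bindings : List (String × String)) (out : String) : Decidable (Spec_get_curie iri bindings out) := by unfold Spec_get_curie; infer_instance

-- ===== CLAIM (what is proved, stated in full; the proofs are below) =====
def Claim_equal_get_curie : Prop := ∀ (iri : String) (bindings : List (String × String)), Dom_get_curie iri bindings → Pre_get_curie iri bindings → Spec_get_curie iri bindings (get_curie iri bindings)

-- ===== LEMMAS AND PROOFS =====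

-- every item of the dict built from `bindings` is one of the original pairs
theorem pvItems_subset (l : List (String × String)) :
    ∀ p ∈ (PySem.Dict.ofList l).items, p ∈ l := by
  have hgen : ∀ (l : List (String × String)) (d : PySem.Dict String String),
      ∀ p ∈ (l.foldl (fun d q => d.insert q.1 q.2) d).items, p ∈ d.items ∨ p ∈ l := by
    intro l
    induction l with
    | nil => intro d p hp; exact Or.inl hp
    | cons q t ih =>
        intro d p hp
        rw [List.foldl_cons] at hp
        rcases ih (d.insert q.1 q.2) p hp with h | h
        · rcases (PySem.Dict.mem_items_insert d q.1 q.2 p).mp h with h' | h'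
          · exact Or.inr (by rw [h']; exact List.mem_cons_self)
          · exact Or.inl h'.1
        · exact Or.inr (List.mem_cons_of_mem _ h)
  intro p hp
  rcases hgen l PySem.Dict.empty p hp with h | h
  · exact absurd h (by simp [PySem.Dict.empty])
  · exact h

-- head-tracking step for B's stable descending insertion sort
def pvHd (h : Option (String × String)) (pu : String × String) : Option (String × String) :=
  match h with
  | none => some pu
  | some m => if PySem.Str.len m.2 < PySem.Str.len pu.2 then some pu else some m

-- the relation between A's accumulator and the head of B's sorted candidate prefix
def pvRel (acc : Option String × String) (h : Option (String × String)) : Prop :=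
  match h with
  | none => acc = (none, "")
  | some m => acc = (some m.1, m.2)

theorem pvLen_pos (s : String) (h : ¬ s = "") : 0 < PySem.Str.len s := by
  rw [PySem.Str.len_eq]
  have hne : s.toList ≠ [] := fun hn => h (String.toList_eq_nil_iff.mp hn)
  exact_mod_cast List.length_pos_iff.mpr hne

-- head of insertBy with the descending-sort comparator
theorem pvHead_insertBy (pu : String × String) (acc : List (String × String)) :
    (PySem.List.insertBy (fun a b => decide ((fun q => PySem.Str.len q.2) b < (fun q => PySem.Str.len q.2) a)) pu acc).head?
      = pvHd acc.head? pu := by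
  cases acc with
  | nil => rfl
  | cons y ys =>
      show (if decide (PySem.Str.len y.2 < PySem.Str.len pu.2) = true then pu :: y :: ys
            else y :: PySem.List.insertBy _ pu ys).head? = pvHd (some y) pu
      by_cases hlt : PySem.Str.len y.2 < PySem.Str.len pu.2
      · rw [if_pos (by rw [decide_eq_true_eq]; exact hlt)]
        show some pu = pvHd (some y) pu
        rw [pvHd, if_pos hlt]
      · rw [if_neg (by rw [decide_eq_true_eq]; exact hlt)]
        show some y = pvHd (some y) pu
        rw [pvHd, if_neg hlt]

-- head of the whole stable descending sort = foldl of the head-tracking step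
theorem pvHead_sort_fold (l : List (String × String)) :
    (PySem.List.sorted l (fun pu => PySem.Str.len pu.2) true).head? = l.foldl pvHd none := by
  rw [PySem.List.sorted_rev_eq_foldl_insertBy]
  suffices hgen : ∀ (l acc : List (String × String)),
      (l.foldl (fun acc x => PySem.List.insertBy (fun a b => decide ((fun q => PySem.Str.len q.2) b < (fun q => PySem.Str.len q.2) a)) x acc) acc).head?
        = l.foldl pvHd acc.head? by
    exact hgen l []
  intro l
  induction l with
  | nil => intro acc; rfl
  | cons x t ih =>
      intro acc
      rw [List.foldl_cons, List.foldl_cons, ih, pvHead_insertBy]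

-- one pass: on a list where every '@'-free matching pair has nonempty prefix and uri,
-- A's state and the head-tracking state over B's candidates stay related
theorem pvMain (iri : String) (l : List (String × String))
    (hpre : ∀ pu ∈ l, (PySem.Str.isIn "@" pu.1 = false ∧ PySem.Str.startswith iri pu.2 = true) → (pu.1 ≠ "" ∧ pu.2 ≠ "")) :
    ∀ (acc : Option String × String) (h : Option (String × String)), pvRel acc h →
      pvRel (l.foldl (pvStepA iri) acc)
        (l.foldl (fun h pu => if pvCand iri pu = true then pvHd h pu else h) h) := by
  induction l with
  | nil => intro acc h hr; exact hr
  | cons pu t ih =>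
      intro acc h hr
      rw [List.foldl_cons, List.foldl_cons]
      apply ih (fun x hx => hpre x (List.mem_cons_of_mem _ hx))
      unfold pvStepA pvCand
      by_cases hat : PySem.Str.isIn "@" pu.1 = true
      · rw [if_pos hat, if_neg (by rw [hat]; exact Bool.false_ne_true)]
        exact hr
      · have hatf : PySem.Str.isIn "@" pu.1 = false := by
          cases hb : PySem.Str.isIn "@" pu.1
          · rfl
          · exact absurd hb hat
        rw [if_neg hat]
        by_cases hsw : PySem.Str.startswith iri pu.2 = true
        · rw [if_pos hsw]
          have hemp : pu.2 ≠ "" := (hpre pu (List.mem_cons_self) ⟨hatf, hsw⟩).2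
          have hcand : (!(PySem.Str.isIn "@" pu.1) && PySem.Str.startswith iri pu.2) = true := by
            rw [hatf, hsw]; rfl
          rw [if_pos hcand]
          cases h with
          | none =>
              have hacc : acc = (none, "") := hr
              rw [hacc]
              rw [if_pos (show PySem.Str.len pu.2 > PySem.Str.len (none (α := String), "").2 from by
                have h2 : PySem.Str.len "" = 0 := by decide
                show PySem.Str.len "" < _
                rw [h2]; exact pvLen_pos pu.2 hemp)]
              exact rfl
          | some m =>
              have hacc : acc = (some m.1, m.2) := hr
              rw [hacc]
              by_cases hgt : PySem.Str.len m.2 < PySem.Str.len pu.2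
              · rw [if_pos hgt]
                show pvRel (some pu.1, pu.2) (pvHd (some m) pu)
                rw [pvHd, if_pos hgt]; exact rfl
              · rw [if_neg hgt]
                show pvRel (some m.1, m.2) (pvHd (some m) pu)
                rw [pvHd, if_neg hgt]; exact rfl
        · have hswf : PySem.Str.startswith iri pu.2 = false := by
            cases hb : PySem.Str.startswith iri pu.2
            · rfl
            · exact absurd hb hsw
          rw [if_neg hsw, if_neg (by rw [hswf, Bool.and_false]; exact Bool.false_ne_true)]
          exact hr

-- A's fold never selects an empty prefix on a list satisfying the precondition
theorem pvNonempty (iri : String) (l : List (String × String))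
    (hpre : ∀ pu ∈ l, (PySem.Str.isIn "@" pu.1 = false ∧ PySem.Str.startswith iri pu.2 = true) → (pu.1 ≠ "" ∧ pu.2 ≠ "")) :
    ∀ (acc : Option String × String), (∀ p, acc.1 = some p → p ≠ "") →
      ∀ p, (l.foldl (pvStepA iri) acc).1 = some p → p ≠ "" := by
  induction l with
  | nil => intro acc hinv; exact hinv
  | cons pu t ih =>
      intro acc hinv
      rw [List.foldl_cons]
      apply ih (fun x hx => hpre x (List.mem_cons_of_mem _ hx))
      intro p hp
      unfold pvStepA at hp
      by_cases hat : PySem.Str.isIn "@" pu.1 = true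
      · rw [if_pos hat] at hp; exact hinv p hp
      · have hatf : PySem.Str.isIn "@" pu.1 = false := by
          cases hb : PySem.Str.isIn "@" pu.1
          · rfl
          · exact absurd hb hat
        rw [if_neg hat] at hp
        by_cases hsw : PySem.Str.startswith iri pu.2 = true
        · rw [if_pos hsw] at hp
          by_cases hgt : PySem.Str.len pu.2 > PySem.Str.len acc.2
          · rw [if_pos hgt] at hp
            have : pu.1 = p := Option.some.inj hp
            rw [← this]
            exact (hpre pu (List.mem_cons_self) ⟨hatf, hsw⟩).1
          · rw [if_neg hgt] at hp; exact hinv p hp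
        · rw [if_neg hsw] at hp; exact hinv p hp

-- ===== VERDICT (by name: the statement is the Claim_ definition above) =====
theorem get_curie_spec : Claim_equal_get_curie := by
  intro iri bindings _hdom hpre0
  have hpre : ∀ pu ∈ (PySem.Dict.ofList bindings).items,
      (PySem.Str.isIn "@" pu.1 = false ∧ PySem.Str.startswith iri pu.2 = true) → (pu.1 ≠ "" ∧ pu.2 ≠ "") :=
    fun pu hpu => hpre0 pu (pvItems_subset bindings pu hpu)
  unfold Spec_get_curie get_curie get_curie_alt
  by_cases hiri : iri = ""
  · rw [if_pos hiri, if_pos hiri]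
  · rw [if_neg hiri, if_neg hiri]
    have hfilter :
        ((((PySem.Dict.ofList bindings).items).filter (pvCand iri)).foldl pvHd none)
          = ((PySem.Dict.ofList bindings).items).foldl
              (fun h pu => if pvCand iri pu = true then pvHd h pu else h) none :=
      List.foldl_filter
    have hrel := pvMain iri ((PySem.Dict.ofList bindings).items) hpre (none, "") none rfl
    rw [← hfilter] at hrel
    rw [← pvHead_sort_fold] at hrel
    cases hsor : PySem.List.sorted (((PySem.Dict.ofList bindings).items).filter (pvCand iri))
        (fun pu => PySem.Str.len pu.2) true with
    | nil =>
        rw [hsor] at hrel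
        have hA : ((PySem.Dict.ofList bindings).items).foldl (pvStepA iri) (none, "") = (none, "") := hrel
        rw [hA]
    | cons pu rest =>
        rw [hsor] at hrel
        have hA : ((PySem.Dict.ofList bindings).items).foldl (pvStepA iri) (none, "")
            = (some pu.1, pu.2) := hrel
        have hp : pu.1 ≠ "" := by
          apply pvNonempty iri ((PySem.Dict.ofList bindings).items) hpre (none, "")
            (fun p hp => absurd hp (by simp)) pu.1
          rw [hA]
        rw [hA]
        cases pu with
        | _ p u =>
            show (if p ≠ "" then _ else _) = _
            rw [if_pos hp]
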